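-- pv_equiv track=rewrite | github.com/eazytbay/alx-interview | 0x01-lockboxes/0-lockboxes.py | canUnlockAll
-- ===== SOURCE A (Python) =====
-- def canUnlockAll(boxes):
--     """function that keeps track of which boxes are unlocked"""
--     boxes_unlocked = {0}
--     # A queue to keep track of the boxes to be opened
--     sequence = [0]
--
--     while sequence:
--         box = sequence.pop(0)
--         # loop through all the keys in the current box
--         for key in boxes[box]:
--             # check if the key opens a box that has not been unlocked yet
--             if key < len(boxes) and key not in boxes_unlocked:
--                 # sum up the box to the set of unlocked boxes
--                 boxes_unlocked.add(key)
--                 # sum up the box to the queue of boxes to be opened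
--                 sequence.append(key)
--
--     # check if all boxes have been unlocked
--     return len(boxes_unlocked) == len(boxes)
-- ===== SOURCE B (Python) =====
-- def canUnlockAll(boxes):
--     """Level-wise fixpoint closure instead of a FIFO queue: repeatedly
--     collect every key reachable from the whole unlocked set until nothing
--     new appears, then compare sizes."""
--     n = len(boxes)
--     unlocked = {0}
--     while True:
--         new = {k for b in unlocked for k in boxes[b] if k < n} - unlocked
--         if not new:
--             return len(unlocked) == n
--         unlocked |= new
-- ===== Notes on version B (the rewrite author's own statement) =====
-- stated objective: alternative
-- what changed: Replaced the FIFO-queue BFS over boxes with a level-wise fixpoint closure: each round recomputes the set of keys reachable from the whole unlocked set and stops when no new box appears, so there is no queue and no per-box worklist state.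
-- outside the precondition, e.g. on canUnlockAll([[], [-5]]): A returns False, B returns False; on canUnlockAll([]): A raises IndexError, B raises IndexError
import Mathlib
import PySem

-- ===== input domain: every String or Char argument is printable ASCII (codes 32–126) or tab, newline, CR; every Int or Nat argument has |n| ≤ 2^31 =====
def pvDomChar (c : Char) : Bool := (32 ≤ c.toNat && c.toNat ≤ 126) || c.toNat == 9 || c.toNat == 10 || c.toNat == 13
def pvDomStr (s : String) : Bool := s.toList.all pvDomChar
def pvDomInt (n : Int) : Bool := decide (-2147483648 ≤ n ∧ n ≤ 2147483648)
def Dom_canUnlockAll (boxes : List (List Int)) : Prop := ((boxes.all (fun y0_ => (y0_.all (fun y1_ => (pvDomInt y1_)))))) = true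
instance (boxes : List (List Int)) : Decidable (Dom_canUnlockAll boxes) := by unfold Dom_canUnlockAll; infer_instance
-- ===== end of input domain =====

-- B replaces A's FIFO-queue BFS with a level-wise fixpoint closure (recompute all reachable keys
-- from the whole unlocked set each round until nothing new appears): an alternative decomposition,
-- not claimed faster. Equivalence is about the return value.

-- boxes[box] with Python indexing (negative index wraps); the [] default is never
-- reached on inputs admitted by Pre_canUnlockAll (it would be an IndexError in Python).
def pvKeys (boxes : List (List Int)) (b : Int) : List Int :=
  (PySem.List.pyGet? boxes b).getD []

-- ===== PORT A =====
-- one iteration of A's inner 'for key in boxes[box]' loop body, state = (boxes_unlocked, sequence)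
def pvBfsStep (boxes : List (List Int)) (vq : PySem.Set Int × List Int) (k : Int) :
    PySem.Set Int × List Int :=
  if k < (boxes.length : Int) ∧ PySem.Set.contains vq.1 k = false
  then (PySem.Set.add vq.1 k, vq.2 ++ [k])
  else vq

-- A's 'while sequence:' loop; fuel only makes the recursion total (under Pre_ it never runs out)
def pvBfs (boxes : List (List Int)) : PySem.Set Int → List Int → Nat → PySem.Set Int
  | visited, _, 0 => visited
  | visited, [], _ + 1 => visited
  | visited, b :: rest, f + 1 =>
    let vq := (pvKeys boxes b).foldl (pvBfsStep boxes) (visited, rest)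
    pvBfs boxes vq.1 vq.2 f

def canUnlockAll (boxes : List (List Int)) : Bool :=
  decide ((pvBfs boxes (PySem.Set.ofList [0]) [0] (4 * boxes.length + 4)).length = boxes.length)

-- ===== PORT B =====
-- the set comprehension {k for b in unlocked for k in boxes[b] if k < n}
def pvCands (boxes : List (List Int)) (unlocked : PySem.Set Int) : PySem.Set Int :=
  List.foldl
    (fun s b => PySem.Set.update s ((pvKeys boxes b).filter (fun k => decide (k < (boxes.length : Int)))))
    PySem.Set.empty unlocked

-- B's 'while True:' loop; fuel only makes the recursion total (under Pre_ it never runs out)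
def pvFix (boxes : List (List Int)) : PySem.Set Int → Nat → Bool
  | _, 0 => false
  | unlocked, f + 1 =>
    let newS := PySem.Set.diff (pvCands boxes unlocked) unlocked
    if newS = [] then decide (unlocked.length = boxes.length)
    else pvFix boxes (PySem.Set.union unlocked newS) f

def canUnlockAll_alt (boxes : List (List Int)) : Bool :=
  pvFix boxes (PySem.Set.ofList [0]) (2 * boxes.length + 2)

-- ===== PRECONDITION & SPEC =====
-- Pre_ excludes empty boxes (A raises IndexError on boxes[0]) and inputs where some box holds a key
-- k with k < -len(boxes): such a key is an index Python cannot resolve and A raises IndexError when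
-- its box is reached. This is a syntactic over-approximation of the crash set: a bad key sitting in
-- an unreachable box is excluded too, even though A returns normally there.
def Pre_canUnlockAll (boxes : List (List Int)) : Prop :=
  boxes ≠ [] ∧ ∀ bx ∈ boxes, ∀ k ∈ bx, -(boxes.length : Int) ≤ k
instance (boxes : List (List Int)) : Decidable (Pre_canUnlockAll boxes) := by
  unfold Pre_canUnlockAll; infer_instance

def pvWitness_canUnlockAll : List (List Int) := [[1], [0]]

def Spec_canUnlockAll (boxes : List (List Int)) (out : Bool) : Prop := out = canUnlockAll_alt boxes
instance (boxes : List (List Int)) (out : Bool) : Decidable (Spec_canUnlockAll boxes out) := by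
  unfold Spec_canUnlockAll; infer_instance

-- ===== CLAIM (what is proved, stated in full; the proofs are below) =====
def Claim_equal_canUnlockAll : Prop := ∀ (boxes : List (List Int)), Dom_canUnlockAll boxes →
  Pre_canUnlockAll boxes → Spec_canUnlockAll boxes (canUnlockAll boxes)

-- ===== LEMMAS AND PROOFS =====

-- every element is a legal Python index into boxes
def pvGood (boxes : List (List Int)) (S : List Int) : Prop :=
  ∀ x ∈ S, -(boxes.length : Int) ≤ x ∧ x < (boxes.length : Int)

-- S is closed under "box b contains key k < len(boxes)"
def pvClosed (boxes : List (List Int)) (S : List Int) : Prop :=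
  ∀ b ∈ S, ∀ k ∈ pvKeys boxes b, k < (boxes.length : Int) → k ∈ S

theorem pvKeys_lb (boxes : List (List Int)) (hPre : Pre_canUnlockAll boxes)
    (b k : Int) (hk : k ∈ pvKeys boxes b) : -(boxes.length : Int) ≤ k := by
  unfold pvKeys at hk
  cases hg : PySem.List.pyGet? boxes b with
  | none => simp [hg] at hk
  | some bx =>
    exact hPre.2 bx (PySem.List.mem_of_pyGet?_eq_some boxes hg) k (by simpa [hg] using hk)

theorem pvGood_length_le (boxes : List (List Int)) (S : List Int)
    (hnd : S.Nodup) (hg : pvGood boxes S) : S.length ≤ 2 * boxes.length := by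
  have hsub : S.toFinset ⊆ Finset.Ico (-(boxes.length : Int)) (boxes.length : Int) := by
    intro x hx
    rw [List.mem_toFinset] at hx
    rcases hg x hx with ⟨h1, h2⟩
    simp [Finset.mem_Ico, h1, h2]
  have hcard := Finset.card_le_card hsub
  rw [Int.card_Ico] at hcard
  have : S.toFinset.card = S.length := List.toFinset_card_of_nodup hnd
  omega

theorem pvBfs_foldl_char (boxes : List (List Int)) (ks : List Int) :
    ∀ (v : PySem.Set Int) (q : List Int),
    ∃ added : List Int,
      (ks.foldl (pvBfsStep boxes) (v, q)).1 = v ++ added ∧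
      (ks.foldl (pvBfsStep boxes) (v, q)).2 = q ++ added ∧
      added.Nodup ∧
      (∀ a ∈ added, a ∈ ks ∧ a < (boxes.length : Int) ∧ a ∉ v) ∧
      (∀ k ∈ ks, k < (boxes.length : Int) → k ∈ v ++ added) := by
  induction ks with
  | nil => intro v q; exact ⟨[], by simp⟩
  | cons k ks ih =>
    intro v q
    by_cases hg : k < (boxes.length : Int) ∧ PySem.Set.contains v k = false
    · have hknv : k ∉ v := by
        intro hmem
        have hc := (PySem.Set.contains_iff (s := v) (x := k)).2 hmem
        rw [hg.2] at hc
        exact Bool.false_ne_true hc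
      have hstep : pvBfsStep boxes (v, q) k = (v ++ [k], q ++ [k]) := by
        unfold pvBfsStep
        rw [if_pos hg]
        rw [PySem.Set.add_of_not_mem hknv]
      rcases ih (v ++ [k]) (q ++ [k]) with ⟨added, h1, h2, hnd, hmem, hcov⟩
      refine ⟨k :: added, ?_, ?_, ?_, ?_, ?_⟩
      · simpa [hstep, List.append_assoc] using h1
      · simpa [hstep, List.append_assoc] using h2
      · refine List.nodup_cons.2 ⟨?_, hnd⟩
        intro hka
        exact (hmem k hka).2.2 (List.mem_append_right _ (by simp))
      · intro a ha
        rcases List.mem_cons.1 ha with rfl | ha'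
        · exact ⟨by simp, hg.1, hknv⟩
        · rcases hmem a ha' with ⟨h3, h4, h5⟩
          exact ⟨by simp [h3], h4, fun hv => h5 (List.mem_append_left _ hv)⟩
      · intro k' hk' hlt
        rcases List.mem_cons.1 hk' with rfl | hk''
        · simp
        · have := hcov k' hk'' hlt
          simpa [List.append_assoc] using this
    · have hstep : pvBfsStep boxes (v, q) k = (v, q) := by
        unfold pvBfsStep
        rw [if_neg hg]
      rcases ih v q with ⟨added, h1, h2, hnd, hmem, hcov⟩
      refine ⟨added, by simpa [hstep] using h1, by simpa [hstep] using h2, hnd, ?_, ?_⟩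
      · intro a ha
        rcases hmem a ha with ⟨h3, h4, h5⟩
        exact ⟨by simp [h3], h4, h5⟩
      · intro k' hk' hlt
        rcases List.mem_cons.1 hk' with rfl | hk''
        · -- guard was false but k' < n, so contains v k' ≠ false, i.e. k' ∈ v
          have hc : PySem.Set.contains v k' = true := by
            cases h : PySem.Set.contains v k' with
            | true => rfl
            | false => exact absurd ⟨hlt, h⟩ hg
          exact List.mem_append_left _ ((PySem.Set.contains_iff (s := v) (x := k')).1 hc)
        · exact hcov k' hk'' hlt

theorem pvBfs_subset_closed (boxes : List (List Int)) (S : List Int)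
    (hS : pvClosed boxes S) :
    ∀ (fuel : Nat) (v : PySem.Set Int) (q : List Int),
      (∀ x ∈ v, x ∈ S) → (∀ x ∈ q, x ∈ v) →
      ∀ x ∈ pvBfs boxes v q fuel, x ∈ S := by
  intro fuel
  induction fuel with
  | zero => intro v q hv _ x hx; exact hv x (by simpa [pvBfs] using hx)
  | succ f ih =>
    intro v q hv hq x hx
    cases q with
    | nil => exact hv x (by simpa [pvBfs] using hx)
    | cons b rest =>
      rcases pvBfs_foldl_char boxes (pvKeys boxes b) v rest with ⟨added, h1, h2, _, hmem, _⟩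
      have hbS : b ∈ S := hv b (hq b (by simp))
      have hvS : ∀ y ∈ v ++ added, y ∈ S := by
        intro y hy
        rcases List.mem_append.1 hy with hy | hy
        · exact hv y hy
        · rcases hmem y hy with ⟨h3, h4, _⟩
          exact hS b hbS y h3 h4
      have hqv : ∀ y ∈ rest ++ added, y ∈ v ++ added := by
        intro y hy
        rcases List.mem_append.1 hy with hy | hy
        · exact List.mem_append_left _ (hq y (by simp [hy]))
        · exact List.mem_append_right _ hy
      have hx' : x ∈ pvBfs boxes (v ++ added) (rest ++ added) f := by
        simpa [pvBfs, h1, h2] using hx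
      exact ih (v ++ added) (rest ++ added) hvS hqv x hx'

theorem pvBfs_supset (boxes : List (List Int)) :
    ∀ (fuel : Nat) (v : PySem.Set Int) (q : List Int),
      ∀ x ∈ v, x ∈ pvBfs boxes v q fuel := by
  intro fuel
  induction fuel with
  | zero => intro v q x hx; simpa [pvBfs] using hx
  | succ f ih =>
    intro v q x hx
    cases q with
    | nil => simpa [pvBfs] using hx
    | cons b rest =>
      rcases pvBfs_foldl_char boxes (pvKeys boxes b) v rest with ⟨added, h1, h2, _, _, _⟩
      have := ih (v ++ added) (rest ++ added) x (List.mem_append_left _ hx)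
      simpa [pvBfs, h1, h2] using this

theorem pvBfs_main (boxes : List (List Int)) (hPre : Pre_canUnlockAll boxes) :
    ∀ (fuel : Nat) (v : PySem.Set Int) (q : List Int),
      v.Nodup → pvGood boxes v → (∀ x ∈ q, x ∈ v) →
      (∀ x ∈ v, x ∉ q → ∀ k ∈ pvKeys boxes x, k < (boxes.length : Int) → k ∈ v) →
      fuel > q.length + 2 * (2 * boxes.length - v.length) →
      pvClosed boxes (pvBfs boxes v q fuel) ∧ (pvBfs boxes v q fuel).Nodup := by
  intro fuel
  induction fuel with
  | zero => intro v q _ _ _ _ hf; omega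
  | succ f ih =>
    intro v q hnd hgood hqv hproc hf
    cases q with
    | nil =>
      refine ⟨?_, by simpa [pvBfs] using hnd⟩
      intro b hb k hk hlt
      simp only [pvBfs] at hb ⊢
      exact hproc b hb (by simp) k hk hlt
    | cons b rest =>
      rcases pvBfs_foldl_char boxes (pvKeys boxes b) v rest with ⟨added, h1, h2, handnd, hmem, hcov⟩
      have hnd' : (v ++ added).Nodup := by
        refine List.nodup_append.2 ⟨hnd, handnd, ?_⟩
        intro a ha a' ha' rfl
        exact (hmem a ha').2.2 ha
      have hgood' : pvGood boxes (v ++ added) := by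
        intro x hx
        rcases List.mem_append.1 hx with hx | hx
        · exact hgood x hx
        · rcases hmem x hx with ⟨h3, h4, _⟩
          exact ⟨pvKeys_lb boxes hPre b x h3, h4⟩
      have hqv' : ∀ x ∈ rest ++ added, x ∈ v ++ added := by
        intro x hx
        rcases List.mem_append.1 hx with hx | hx
        · exact List.mem_append_left _ (hqv x (by simp [hx]))
        · exact List.mem_append_right _ hx
      have hproc' : ∀ x ∈ v ++ added, x ∉ rest ++ added →
          ∀ k ∈ pvKeys boxes x, k < (boxes.length : Int) → k ∈ v ++ added := by
        intro x hx hxq k hk hlt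
        rcases List.mem_append.1 hx with hxv | hxa
        · by_cases hxb : x = b
          · subst hxb; exact hcov k hk hlt
          · have hxold : x ∉ b :: rest := by
              intro hmem'
              rcases List.mem_cons.1 hmem' with h | h
              · exact hxb h
              · exact hxq (List.mem_append_left _ h)
            exact List.mem_append_left _ (hproc x hxv hxold k hk hlt)
        · exact absurd (List.mem_append_right _ hxa) hxq
      have hlen : (v ++ added).length ≤ 2 * boxes.length :=
        pvGood_length_le boxes (v ++ added) hnd' hgood'
      have hva : v.length + added.length ≤ 2 * boxes.length := by
        simpa [List.length_append] using hlen
      have hf' : f > (rest ++ added).length + 2 * (2 * boxes.length - (v ++ added).length) := by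
        simp only [List.length_cons] at hf
        simp only [List.length_append]
        omega
      have := ih (v ++ added) (rest ++ added) hnd' hgood' hqv' hproc' hf'
      simpa [pvBfs, h1, h2] using this

theorem pvCands_mem (boxes : List (List Int)) (U : PySem.Set Int) (k : Int) :
    k ∈ pvCands boxes U ↔
      ∃ b ∈ U, k ∈ pvKeys boxes b ∧ k < (boxes.length : Int) := by
  unfold pvCands
  suffices h : ∀ (s : PySem.Set Int),
      k ∈ List.foldl
        (fun s b => PySem.Set.update s ((pvKeys boxes b).filter (fun k => decide (k < (boxes.length : Int)))))
        s U ↔ k ∈ s ∨ ∃ b ∈ U, k ∈ pvKeys boxes b ∧ k < (boxes.length : Int) by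
    rw [h PySem.Set.empty]
    simp [PySem.Set.empty]
  induction U with
  | nil => intro s; simp
  | cons b U ih =>
    intro s
    rw [List.foldl_cons, ih]
    simp only [PySem.Set.mem_update _ _ _, List.mem_filter, List.mem_cons, decide_eq_true_eq]
    constructor
    · rintro (⟨hs | ⟨h1, h2⟩⟩ | ⟨b', hb', h1, h2⟩)
      · exact Or.inl hs
      · exact Or.inr ⟨b, Or.inl rfl, h1, h2⟩
      · exact Or.inr ⟨b', Or.inr hb', h1, h2⟩
    · rintro (hs | ⟨b', hb' | hb', h1, h2⟩)
      · exact Or.inl (Or.inl hs)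
      · exact Or.inl (Or.inr ⟨hb' ▸ h1, h2⟩)
      · exact Or.inr ⟨b', hb', h1, h2⟩

theorem pvCands_nodup (boxes : List (List Int)) (U : PySem.Set Int) :
    (pvCands boxes U).Nodup := by
  unfold pvCands
  suffices h : ∀ (s : PySem.Set Int), s.Nodup →
      (List.foldl
        (fun s b => PySem.Set.update s ((pvKeys boxes b).filter (fun k => decide (k < (boxes.length : Int)))))
        s U).Nodup by
    exact h PySem.Set.empty (by simp [PySem.Set.empty])
  induction U with
  | nil => intro s hs; simpa using hs
  | cons b U ih =>
    intro s hs
    rw [List.foldl_cons]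
    exact ih _ (PySem.Set.nodup_update _ _ hs)

theorem pvFix_main (boxes : List (List Int)) (hPre : Pre_canUnlockAll boxes) :
    ∀ (fuel : Nat) (U : PySem.Set Int),
      U.Nodup → pvGood boxes U →
      fuel > 2 * boxes.length - U.length →
      ∃ F : List Int,
        pvFix boxes U fuel = decide (F.length = boxes.length) ∧
        F.Nodup ∧ (∀ x ∈ U, x ∈ F) ∧ pvClosed boxes F ∧
        (∀ S, pvClosed boxes S → (∀ x ∈ U, x ∈ S) → ∀ x ∈ F, x ∈ S) := by
  intro fuel
  induction fuel with
  | zero => intro U _ _ hf; omega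
  | succ f ih =>
    intro U hnd hgood hf
    by_cases hnew : PySem.Set.diff (pvCands boxes U) U = ([] : List Int)
    · refine ⟨U, ?_, hnd, fun x hx => hx, ?_, fun S _ hUS x hx => hUS x hx⟩
      · simp [pvFix, hnew]
      · intro b hb k hk hlt
        have hkc : k ∈ pvCands boxes U := (pvCands_mem boxes U k).2 ⟨b, hb, hk, hlt⟩
        by_contra hkU
        have : k ∈ PySem.Set.diff (pvCands boxes U) U := (PySem.Set.mem_diff _ _ _).2 ⟨hkc, hkU⟩
        rw [hnew] at this
        simp at this
    · set newS := PySem.Set.diff (pvCands boxes U) U with hnewS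
      have hndnew : newS.Nodup := PySem.Set.nodup_diff _ _ (pvCands_nodup boxes U)
      set U' := PySem.Set.union U newS with hU'
      have hndU' : U'.Nodup := PySem.Set.nodup_union _ _ hnd
      have hmemU' : ∀ x, x ∈ U' ↔ x ∈ U ∨ x ∈ newS := fun x => PySem.Set.mem_union _ _ _
      have hgood' : pvGood boxes U' := by
        intro x hx
        rcases (hmemU' x).1 hx with hx | hx
        · exact hgood x hx
        · have hxc := ((PySem.Set.mem_diff _ _ _).1 hx).1
          rcases (pvCands_mem boxes U x).1 hxc with ⟨b, _, h1, h2⟩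
          exact ⟨pvKeys_lb boxes hPre b x h1, h2⟩
      have hlenU' : U'.length ≤ 2 * boxes.length := pvGood_length_le boxes U' hndU' hgood'
      have hUsub : ∀ x ∈ U, x ∈ U' := fun x hx => (hmemU' x).2 (Or.inl hx)
      have hlt : U.length < U'.length := by
        rcases List.exists_mem_of_ne_nil newS hnew with ⟨y, hy⟩
        have hyU : y ∉ U := ((PySem.Set.mem_diff _ _ _).1 hy).2
        have hsub : U.toFinset ⊂ U'.toFinset := by
          constructor
          · intro x hx
            rw [List.mem_toFinset] at hx ⊢
            exact hUsub x hx
          · intro hcon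
            have : y ∈ U.toFinset := hcon (by rw [List.mem_toFinset]; exact (hmemU' y).2 (Or.inr hy))
            rw [List.mem_toFinset] at this
            exact hyU this
        have := Finset.card_lt_card hsub
        rwa [List.toFinset_card_of_nodup hnd, List.toFinset_card_of_nodup hndU'] at this
      have hf' : f > 2 * boxes.length - U'.length := by omega
      rcases ih U' hndU' hgood' hf' with ⟨F, heq, hFnd, hUF, hFcl, hFmin⟩
      refine ⟨F, ?_, hFnd, fun x hx => hUF x (hUsub x hx), hFcl, ?_⟩
      · rw [← heq]
        simp only [pvFix]
        rw [if_neg hnew]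
      · intro S hScl hUS x hx
        refine hFmin S hScl ?_ x hx
        intro y hy
        rcases (hmemU' y).1 hy with hy | hy
        · exact hUS y hy
        · have hyc := ((PySem.Set.mem_diff _ _ _).1 hy).1
          rcases (pvCands_mem boxes U y).1 hyc with ⟨b, hb, h1, h2⟩
          exact hScl b (hUS b hb) y h1 h2

-- ===== VERDICT (by name: the statement is the Claim_ definition above) =====
theorem canUnlockAll_spec : Claim_equal_canUnlockAll := by
  intro boxes _ hPre
  unfold Spec_canUnlockAll canUnlockAll canUnlockAll_alt
  have hn : 1 ≤ boxes.length := by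
    cases boxes with
    | nil => exact absurd rfl hPre.1
    | cons _ _ => simp
  have h0 : PySem.Set.ofList [0] = ([0] : List Int) := by decide
  rw [h0]
  have hgood0 : pvGood boxes [0] := by
    intro x hx
    rcases List.mem_singleton.1 hx with rfl
    constructor
    · omega
    · exact_mod_cast hn
  set R := pvBfs boxes [0] [0] (4 * boxes.length + 4) with hR
  have hmainA := pvBfs_main boxes hPre (4 * boxes.length + 4) [0] [0]
    (by simp) hgood0 (by simp)
    (by intro x hx hq; exact absurd hx hq)
    (by simp; omega)
  rcases hmainA with ⟨hRcl, hRnd⟩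
  have h0R : (0 : Int) ∈ R := pvBfs_supset boxes _ [0] [0] 0 (by simp)
  rcases pvFix_main boxes hPre (2 * boxes.length + 2) [0] (by simp) hgood0 (by omega)
    with ⟨F, hFeq, hFnd, hUF, hFcl, hFmin⟩
  have h0F : (0 : Int) ∈ F := hUF 0 (by simp)
  have hRF : ∀ x ∈ R, x ∈ F :=
    pvBfs_subset_closed boxes F hFcl (4 * boxes.length + 4) [0] [0]
      (by intro x hx; rcases List.mem_singleton.1 hx with rfl; exact h0F)
      (by simp)
  have hFR : ∀ x ∈ F, x ∈ R := hFmin R hRcl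
    (by intro x hx; rcases List.mem_singleton.1 hx with rfl; exact h0R)
  have hlen : R.length = F.length := by
    have hfs : R.toFinset = F.toFinset := by
      ext x
      simp only [List.mem_toFinset]
      exact ⟨hRF x, hFR x⟩
    rw [← List.toFinset_card_of_nodup hRnd, ← List.toFinset_card_of_nodup hFnd, hfs]
  rw [hFeq, hlen]
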